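-- pv_equiv track=rewrite | github.com/mdshihabshahriar/Learning-Python | Assignment 1/S_Max_Split.py | maxSplit
-- ===== SOURCE A (Python) =====
-- def maxSplit(s):
--     cnt = 0
--     result = []
--     tmp = ""
--     for char in s:
--         tmp += char
--         if tmp.count("L") == tmp.count("R"):
--             cnt += 1
--             result.append(tmp)
--             tmp = ""
--     return cnt, result
-- ===== SOURCE B (Python) =====
-- def maxSplit(s):
--     bals = [0]
--     for ch in s:
--         bals.append(bals[-1] + (ch == 'L') - (ch == 'R'))
--     cuts = [i for i, b in enumerate(bals) if b == 0]
--     result = [s[a:b] for a, b in zip(cuts, cuts[1:])]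
--     return len(result), result
-- ===== Notes on version B (the rewrite author's own statement) =====
-- stated objective: alternative
-- what changed: B replaces A's single accumulation loop that re-counts the whole pending segment at every character by a staged pipeline: build the prefix-balance list once, collect the positions where the balance is zero, then slice the string between consecutive cut positions; O(n) instead of O(n^2), but CPython's C-level str.count keeps A's constants small so no speed is claimed.
import Mathlib
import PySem

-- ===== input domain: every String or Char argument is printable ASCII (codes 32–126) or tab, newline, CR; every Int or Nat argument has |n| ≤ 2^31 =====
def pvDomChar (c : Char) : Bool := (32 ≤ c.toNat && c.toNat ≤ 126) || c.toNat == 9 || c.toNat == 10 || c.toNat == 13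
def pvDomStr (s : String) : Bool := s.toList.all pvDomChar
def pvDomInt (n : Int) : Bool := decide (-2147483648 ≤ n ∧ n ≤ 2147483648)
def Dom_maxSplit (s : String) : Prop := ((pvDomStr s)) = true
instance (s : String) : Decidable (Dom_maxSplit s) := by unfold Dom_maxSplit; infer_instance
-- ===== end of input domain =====

-- B replaces A's incremental accumulation-and-recount loop by a staged pipeline:
-- prefix-balance list, then the zero-balance cut positions, then slices between
-- consecutive cuts (alternative decomposition; no speed claim here).

-- ===== PORT A =====
-- state: (cnt, result, tmp); tmp kept as List Char (tmp.count "L" for the 1-char needle is the char count)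
def maxSplitStepA (st : Int × List String × List Char) (c : Char) : Int × List String × List Char :=
  let tmp := st.2.2 ++ [c]
  if tmp.count 'L' = tmp.count 'R' then
    (st.1 + 1, st.2.1 ++ [String.ofList tmp], [])
  else
    (st.1, st.2.1, tmp)

def maxSplit (s : String) : Int × List String :=
  let st := s.toList.foldl maxSplitStepA (0, [], [])
  (st.1, st.2.1)

-- ===== PORT B =====
-- bals.append(bals[-1] + (ch=='L') - (ch=='R')); bals starts as [0] and only grows,
-- so bals[-1] is its last element: getLastD 0 is exact here
def maxSplitBals (cs : List Char) : List Int :=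
  cs.foldl (fun acc c =>
    acc ++ [acc.getLastD 0 + (if c = 'L' then 1 else 0) - (if c = 'R' then 1 else 0)]) [0]

-- [i for i, b in enumerate(bals) if b == 0]
def maxSplitCuts (bals : List Int) : List Int :=
  (PySem.List.enumerate bals 0).filterMap (fun p => if p.2 = 0 then some p.1 else none)

def maxSplit_alt (s : String) : Int × List String :=
  let bals := maxSplitBals s.toList
  let cuts := maxSplitCuts bals
  let result := (cuts.zip (PySem.List.slice cuts (some 1) none)).map
    (fun p => String.ofList (PySem.List.slice s.toList (some p.1) (some p.2)))
  ((result.length : Int), result)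

-- ===== PRECONDITION & SPEC =====
def Spec_maxSplit (s : String) (out : Int × List String) : Prop := out = maxSplit_alt s
instance (s : String) (out : Int × List String) : Decidable (Spec_maxSplit s out) := by unfold Spec_maxSplit; infer_instance

-- ===== CLAIM (what is proved, stated in full; the proofs are below) =====
def Claim_equal_maxSplit : Prop := ∀ (s : String), Dom_maxSplit s → Spec_maxSplit s (maxSplit s)

-- ===== LEMMAS AND PROOFS =====

-- proof-only helpers: balance delta of one char, running-balance scan, cut positions
def pvDelta (c : Char) : Int := (if c = 'L' then 1 else 0) - (if c = 'R' then 1 else 0)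

def pvScan (b : Int) : List Char → List Int
  | [] => []
  | c :: cs => (b + pvDelta c) :: pvScan (b + pvDelta c) cs

def pvCutsFrom (b i : Int) : List Char → List Int
  | [] => []
  | c :: cs => if b + pvDelta c = 0 then (i + 1) :: pvCutsFrom 0 (i + 1) cs
               else pvCutsFrom (b + pvDelta c) (i + 1) cs

def pvSegs (full : List Char) (l : List Int) : List String :=
  (l.zip (l.drop 1)).map (fun p => String.ofList (PySem.List.slice full (some p.1) (some p.2)))

theorem pvBals_eq_scan (cs : List Char) (acc : List Int) (b : Int) :
    cs.foldl (fun acc c =>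
      acc ++ [acc.getLastD 0 + (if c = 'L' then 1 else 0) - (if c = 'R' then 1 else 0)])
      (acc ++ [b]) = acc ++ b :: pvScan b cs := by
  induction cs generalizing acc b with
  | nil => simp [pvScan]
  | cons c cs ih =>
    simp only [List.foldl_cons, pvScan]
    have h : (acc ++ [b]).getLastD 0 = b := by simp
    rw [h]
    have := ih (acc ++ [b]) (b + pvDelta c)
    simp only [List.append_assoc, List.cons_append, List.nil_append] at this ⊢
    have hd : b + (if c = 'L' then 1 else 0) - (if c = 'R' then 1 else 0) = b + pvDelta c := by
      simp [pvDelta]; ring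
    rw [hd, this]

theorem pvCuts_eq_cutsFrom (cs : List Char) (b i : Int) :
    (PySem.List.enumerate (pvScan b cs) (i + 1)).filterMap
      (fun p => if p.2 = 0 then some p.1 else none) = pvCutsFrom b i cs := by
  induction cs generalizing b i with
  | nil => simp [pvScan, pvCutsFrom, PySem.List.enumerate_nil]
  | cons c cs ih =>
    simp only [pvScan, pvCutsFrom, PySem.List.enumerate_cons, List.filterMap_cons]
    by_cases h : b + pvDelta c = 0
    · simp [h, ih 0 (i + 1)]
    · simp [h, ih (b + pvDelta c) (i + 1)]

-- main loop invariant: A's fold over the remaining characters cs equals the segments cut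
-- at the zero positions of the running balance, relative to consumed prefix front ++ tmp
theorem maxSplit_loop (cs : List Char) (front tmp : List Char) (res : List String) :
    (cs.foldl maxSplitStepA ((res.length : Int), res, tmp)).1
      = (((cs.foldl maxSplitStepA ((res.length : Int), res, tmp)).2.1).length : Int) ∧
    (cs.foldl maxSplitStepA ((res.length : Int), res, tmp)).2.1
      = res ++ pvSegs (front ++ tmp ++ cs)
          (((front.length : Nat) : Int) ::
            pvCutsFrom ((tmp.count 'L' : Int) - (tmp.count 'R' : Int))
              ((front.length + tmp.length : Nat) : Int) cs) := by
  induction cs generalizing front tmp res with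
  | nil => simp [pvSegs, pvCutsFrom]
  | cons c cs ih =>
    simp only [List.foldl_cons, pvCutsFrom]
    have hbal : ((tmp.count 'L' : Int) - (tmp.count 'R' : Int)) + pvDelta c
        = ((tmp ++ [c]).count 'L' : Int) - ((tmp ++ [c]).count 'R' : Int) := by
      by_cases hL : c = 'L' <;> by_cases hR : c = 'R' <;>
        simp [hL, hR, pvDelta, List.count_append] at * <;> omega
    by_cases hc : (tmp ++ [c]).count 'L' = (tmp ++ [c]).count 'R'
    · -- the balance returns to zero: a segment is cut here
      have hbal0 : ((tmp.count 'L' : Int) - (tmp.count 'R' : Int)) + pvDelta c = 0 := by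
        rw [hbal]; omega
      have ha : maxSplitStepA ((res.length : Int), res, tmp) c
          = (((res ++ [String.ofList (tmp ++ [c])]).length : Int),
             res ++ [String.ofList (tmp ++ [c])], ([] : List Char)) := by
        simp [maxSplitStepA, hc]
      rw [ha, if_pos hbal0]
      have hslice : PySem.List.slice (front ++ tmp ++ (c :: cs))
          (some ((front.length : Nat) : Int))
          (some (((front.length + tmp.length : Nat) : Int) + 1))
          = tmp ++ [c] := by
        have h1 : (((front.length + tmp.length : Nat) : Int) + 1)
            = ((front.length + tmp.length + 1 : Nat) : Int) := by push_cast; ring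
        rw [h1, PySem.List.slice_natCast]
        have h2 : front ++ tmp ++ (c :: cs) = front ++ ((tmp ++ [c]) ++ cs) := by simp
        rw [h2, List.drop_append_of_le_length (by simp), List.drop_length]
        have h3 : front.length + tmp.length + 1 - front.length = tmp.length + 1 := by omega
        simp only [List.append_assoc, List.cons_append, List.nil_append] at *
        rw [h3, List.take_append]
        simp
      have hsegs : pvSegs (front ++ tmp ++ (c :: cs))
          (((front.length : Nat) : Int) ::
            (((front.length + tmp.length : Nat) : Int) + 1) ::
              pvCutsFrom 0 (((front.length + tmp.length : Nat) : Int) + 1) cs)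
          = String.ofList (tmp ++ [c]) ::
            pvSegs (front ++ tmp ++ (c :: cs))
              ((((front.length + tmp.length : Nat) : Int) + 1) ::
                pvCutsFrom 0 (((front.length + tmp.length : Nat) : Int) + 1) cs) := by
        simp only [pvSegs, List.drop_succ_cons, List.drop_zero, List.zip_cons_cons,
          List.map_cons, hslice]
      rw [hsegs]
      have := (ih (front ++ tmp ++ [c]) [] (res ++ [String.ofList (tmp ++ [c])]))
      simp only [List.length_append, List.length_cons, List.length_nil, List.append_assoc,
        List.cons_append, List.nil_append, List.append_nil, List.count_nil, Nat.add_zero,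
        Nat.cast_zero, sub_zero] at this ⊢
      push_cast at this ⊢
      obtain ⟨t1, t2⟩ := this
      refine ⟨by rw [t1], ?_⟩
      rw [t2]
      have hadd : (front.length : Int) + ((tmp.length : Int) + 1)
          = (front.length : Int) + (tmp.length : Int) + 1 := by ring
      rw [hadd]
    · -- the segment grows
      have hbal0 : ¬ (((tmp.count 'L' : Int) - (tmp.count 'R' : Int)) + pvDelta c = 0) := by
        rw [hbal]
        intro h
        apply hc
        omega
      have ha : maxSplitStepA ((res.length : Int), res, tmp) c
          = ((res.length : Int), res, tmp ++ [c]) := by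
        simp only [maxSplitStepA]
        rw [if_neg hc]
      rw [ha, if_neg hbal0, hbal]
      have := ih front (tmp ++ [c]) res
      simp only [List.length_append, List.length_cons, List.length_nil, List.append_assoc,
        List.cons_append, List.nil_append] at this ⊢
      push_cast at this ⊢
      exact this

-- ===== VERDICT (by name: the statement is the Claim_ definition above) =====
theorem maxSplit_spec : Claim_equal_maxSplit := by
  intro s _
  unfold Spec_maxSplit maxSplit maxSplit_alt
  dsimp only
  have hb : maxSplitBals s.toList = 0 :: pvScan 0 s.toList := by
    have := pvBals_eq_scan s.toList [] 0
    simpa [maxSplitBals] using this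
  have hcuts : maxSplitCuts (maxSplitBals s.toList) = 0 :: pvCutsFrom 0 0 s.toList := by
    rw [hb]
    simp [maxSplitCuts, PySem.List.enumerate_cons]
    simpa using pvCuts_eq_cutsFrom s.toList 0 0
  have hslice1 : ∀ (l : List Int), PySem.List.slice l (some 1) none = l.drop 1 := by
    intro l
    have : (1 : Int) = ((1 : Nat) : Int) := rfl
    rw [this, PySem.List.slice_from_natCast]
  rw [hcuts, hslice1]
  have h := maxSplit_loop s.toList [] [] []
  simp only [List.length_nil, List.count_nil, List.nil_append, Nat.cast_zero, Nat.add_zero,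
    sub_zero] at h
  obtain ⟨h1, h2⟩ := h
  rw [h1, h2]
  simp [pvSegs]
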